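-- pv_equiv track=rewrite | github.com/tarunganesh2004/GFG | 2025/March/27th_march.py | brute_force
-- ===== SOURCE A (Python) =====
-- arr=[900, 940, 950, 1100, 1500, 1800]
--
-- dep=[910, 1200, 1120, 1130, 1900, 2000]
--
-- def brute_force(arr,dep):
--     n=len(arr)
--     res=1
--     for i in range(n):
--         count=1
--         for j in range(i+1,n):
--             if arr[j]<=dep[i] and dep[j]>=arr[i]:
--                 count+=1
--         res=max(res,count)
--     return res
-- ===== SOURCE B (Python) =====
-- from bisect import bisect_right, insort
--
--
-- def brute_force(arr, dep):
--     # Right-to-left sweep keeping the already-processed (later) intervals in a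
--     # list SORTED by arrival: a binary search cuts off everything arriving after
--     # dep[i], and only that sorted prefix is scanned for the departure test.
--     best = 1
--     later = []  # intervals after the current one, sorted by (arrival, departure)
--     for i in range(len(arr) - 1, -1, -1):
--         a, d = arr[i], dep[i]
--         k = bisect_right(later, d, key=lambda q: q[0])  # later intervals with arrival <= d
--         c = 1 + sum(1 for q in later[:k] if q[1] >= a)
--         if c > best:
--             best = c
--         insort(later, (a, d))
--     return best
-- ===== Notes on version B (the rewrite author's own statement) =====
-- stated objective: faster
-- what changed: Replaced A's full nested index scan by a right-to-left sweep that keeps the later intervals in a list kept sorted by arrival with bisect.insort, finds the admissible arrivals (arr[j] <= dep[i]) by binary search, and scans only that sorted prefix for the departure test.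
-- outside the precondition, e.g. on brute_force([0], []): A returns 1, B raises IndexError
import Mathlib
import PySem

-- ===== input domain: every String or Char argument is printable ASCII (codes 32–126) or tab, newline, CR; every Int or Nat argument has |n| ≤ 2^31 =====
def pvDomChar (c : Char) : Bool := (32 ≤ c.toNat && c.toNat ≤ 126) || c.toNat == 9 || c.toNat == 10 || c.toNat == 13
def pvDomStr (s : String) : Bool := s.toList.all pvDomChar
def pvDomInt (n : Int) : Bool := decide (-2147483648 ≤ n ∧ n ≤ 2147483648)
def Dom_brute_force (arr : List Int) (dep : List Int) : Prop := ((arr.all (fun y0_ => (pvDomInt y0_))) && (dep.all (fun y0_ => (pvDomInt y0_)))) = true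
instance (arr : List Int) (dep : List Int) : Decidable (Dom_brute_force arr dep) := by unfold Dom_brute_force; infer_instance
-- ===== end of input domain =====

-- B replaces A's full nested index scan by a right-to-left sweep that keeps the later
-- intervals in a list sorted by arrival, binary-searches the cutoff of admissible
-- arrivals, and scans only that sorted prefix (objective: faster, constant-factor).


-- ===== PORT A =====
def brute_force (arr : List Int) (dep : List Int) : Int :=
  let n : Int := arr.length
  (PySem.List.pyRange 0 n 1).foldl (fun res i =>
    let count : Int := (PySem.List.pyRange (i + 1) n 1).foldl (fun count j =>
      if PySem.List.pyGetD arr j 0 ≤ PySem.List.pyGetD dep i 0 ∧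
         PySem.List.pyGetD dep j 0 ≥ PySem.List.pyGetD arr i 0 then count + 1 else count) 1
    max res count) 1

-- ===== PORT B =====
-- bisect.insort on a list of pairs (Python tuple order = lexicographic, insert after equals)
def pvInsort (p : Int × Int) : List (Int × Int) → List (Int × Int)
  | [] => [p]
  | q :: qs => if p.1 < q.1 ∨ (p.1 = q.1 ∧ p.2 < q.2) then p :: q :: qs else q :: pvInsort p qs

def brute_force_alt (arr : List Int) (dep : List Int) : Int :=
  ((PySem.List.pyRange ((arr.length : Int) - 1) (-1) (-1)).foldl
    (fun (st : Int × List (Int × Int)) i =>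
      let a := PySem.List.pyGetD arr i 0
      let d := PySem.List.pyGetD dep i 0
      -- bisect_right(later, d, key=q[0]): binary search over the arrival keys
      let k := PySem.List.bisectRight (st.2.map Prod.fst) d
      let c : Int := 1 + (((st.2.take k).filter (fun q => q.2 ≥ a)).length : Int)
      (if c > st.1 then c else st.1, pvInsort (a, d) st.2)) (1, [])).1

-- ===== PRECONDITION & SPEC =====
-- Pre_ excludes len(arr) > len(dep): there A reads dep past its end and (except on
-- degenerate cases where short-circuiting lets it return) raises IndexError; B's
-- sweep reads dep[i] for every i, so it raises on all of those inputs.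
def Pre_brute_force (arr : List Int) (dep : List Int) : Prop := arr.length ≤ dep.length
instance (arr : List Int) (dep : List Int) : Decidable (Pre_brute_force arr dep) := by unfold Pre_brute_force; infer_instance
def pvWitness_brute_force : List Int × List Int := ([900, 940, 950], [910, 1200, 1120])

def Spec_brute_force (arr : List Int) (dep : List Int) (out : Int) : Prop := out = brute_force_alt arr dep
instance (arr : List Int) (dep : List Int) (out : Int) : Decidable (Spec_brute_force arr dep out) := by unfold Spec_brute_force; infer_instance

-- ===== CLAIM (what is proved, stated in full; the proofs are below) =====
def Claim_equal_brute_force : Prop := ∀ (arr : List Int) (dep : List Int), Dom_brute_force arr dep → Pre_brute_force arr dep → Spec_brute_force arr dep (brute_force arr dep)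

-- ===== LEMMAS AND PROOFS =====

-- count of later intervals matching p
def pvCnt (p : Int × Int) (l : List (Int × Int)) : Int :=
  ((l.filter (fun q => q.1 ≤ p.2 && p.1 ≤ q.2)).length : Int)

-- the common mathematical form: best overlap count over the list of intervals
def pvBest : List (Int × Int) → Int
  | [] => 1
  | p :: rest => max (pvBest rest) (1 + pvCnt p rest)

-- insertion sort by (fst, snd) lexicographically, as B's insort builds it
def pvSort (l : List (Int × Int)) : List (Int × Int) := l.foldr pvInsort []

lemma one_le_pvBest (l : List (Int × Int)) : 1 ≤ pvBest l := by
  induction l with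
  | nil => simp [pvBest]
  | cons p rest ih => simp [pvBest]; left; exact ih

-- A's outer loop, read as structural recursion on the suffix
def pvFoldA : List (Int × Int) → Int → Int
  | [], r => r
  | p :: rest, r => pvFoldA rest (max r (1 + pvCnt p rest))

lemma pvFoldA_eq_max (l : List (Int × Int)) : ∀ r : Int, 1 ≤ r → pvFoldA l r = max r (pvBest l) := by
  induction l with
  | nil => intro r hr; simp [pvFoldA, pvBest]; omega
  | cons p rest ih =>
    intro r hr
    have h1 : (1 : Int) ≤ max r (1 + pvCnt p rest) := le_trans hr (le_max_left _ _)
    rw [pvFoldA, ih _ h1, pvBest]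
    omega

-- inner loop of A over the pair list
lemma inner_loop (pairs : List (Int × Int)) (pi : Int × Int) :
    ∀ (a : Int) (c : Int), 0 ≤ a →
    (PySem.List.pyRange a pairs.length 1).foldl (fun count j =>
        if (PySem.List.pyGetD pairs j (0, 0)).1 ≤ pi.2 ∧
           (PySem.List.pyGetD pairs j (0, 0)).2 ≥ pi.1 then count + 1 else count) c
      = c + pvCnt pi (pairs.drop a.toNat) := by
  intro a c ha
  rw [PySem.List.foldl_pyRange_pyGetD' pairs (0,0)
      (fun count q => if q.1 ≤ pi.2 ∧ q.2 ≥ pi.1 then count + 1 else count) c ha]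
  generalize pairs.drop a.toNat = l
  induction l generalizing c with
  | nil => simp [pvCnt]
  | cons q rest ih =>
    simp only [List.foldl_cons, ih, pvCnt]
    by_cases h : q.1 ≤ pi.2 ∧ q.2 ≥ pi.1
    · simp [h]
      omega
    · have hb : (q.1 ≤ pi.2 && pi.1 ≤ q.2) = false := by
        rw [Bool.and_eq_false_iff]
        by_cases h1 : q.1 ≤ pi.2
        · right; simp; omega
        · left; simp; omega
      simp [h, hb]

-- outer loop of A over the pair list
lemma outer_loop (pairs : List (Int × Int)) :
    ∀ (a : Int) (r : Int), 0 ≤ a →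
    (PySem.List.pyRange a pairs.length 1).foldl (fun res i =>
        max res (1 + pvCnt (PySem.List.pyGetD pairs i (0, 0)) (pairs.drop (i.toNat + 1)))) r
      = pvFoldA (pairs.drop a.toNat) r := by
  intro a r ha
  by_cases hlt : a < pairs.length
  · rw [PySem.List.pyRange_one_cons (by exact_mod_cast hlt)]
    simp only [List.foldl_cons]
    have hdrop : pairs.drop a.toNat
        = PySem.List.pyGetD pairs a (0, 0) :: pairs.drop (a.toNat + 1) := by
      have h1 : a.toNat < pairs.length := by omega
      rw [PySem.List.pyGetD_eq_getElem pairs (0,0) ha (by exact_mod_cast hlt)]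
      exact (List.drop_eq_getElem_cons h1)
    have := outer_loop pairs (a + 1) (max r (1 + pvCnt (PySem.List.pyGetD pairs a (0, 0)) (pairs.drop (a.toNat + 1)))) (by omega)
    rw [this, hdrop, pvFoldA]
    have : (a + 1).toNat = a.toNat + 1 := by omega
    rw [this]
  · rw [PySem.List.pyRange_one_eq_nil (by exact_mod_cast not_lt.mp hlt)]
    have : pairs.drop a.toNat = [] := by
      apply List.drop_eq_nil_of_le; omega
    simp [this, pvFoldA]
termination_by a _r _ha => pairs.length - a.toNat
decreasing_by omega

lemma brute_force_eq (arr dep : List Int) (hpre : arr.length ≤ dep.length) :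
    brute_force arr dep = pvBest (List.zip arr dep) := by
  unfold brute_force
  set pairs := List.zip arr dep with hp
  have hlen : pairs.length = arr.length := by
    simp [hp]; omega
  have hbody : ∀ (r i : Int), i ∈ PySem.List.pyRange 0 (arr.length : Int) 1 →
      (fun res i =>
        let count : Int := (PySem.List.pyRange (i + 1) (arr.length : Int) 1).foldl (fun count j =>
          if PySem.List.pyGetD arr j 0 ≤ PySem.List.pyGetD dep i 0 ∧
             PySem.List.pyGetD dep j 0 ≥ PySem.List.pyGetD arr i 0 then count + 1 else count) 1
        max res count) r i
      = max r (1 + pvCnt (PySem.List.pyGetD pairs i (0, 0)) (pairs.drop (i.toNat + 1))) := by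
    intro r i hi
    rw [PySem.List.mem_pyRange_one] at hi
    have hget : ∀ (k : Int), 0 ≤ k → k < (arr.length : Int) →
        PySem.List.pyGetD pairs k (0, 0) = (PySem.List.pyGetD arr k 0, PySem.List.pyGetD dep k 0) := by
      intro k hk0 hk
      have hk1 : k.toNat < arr.length := by omega
      have hk2 : k.toNat < dep.length := by omega
      have hk3 : k.toNat < pairs.length := by omega
      rw [PySem.List.pyGetD_eq_getElem pairs (0,0) hk0 (by exact_mod_cast (by omega : k < (pairs.length : Int))),
          PySem.List.pyGetD_eq_getElem arr 0 hk0 hk,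
          PySem.List.pyGetD_eq_getElem dep 0 hk0 (by exact_mod_cast (by omega : k < (dep.length : Int)))]
      simp [hp]
    have hbody2 : ∀ (c j : Int), j ∈ PySem.List.pyRange (i + 1) (arr.length : Int) 1 →
        (if PySem.List.pyGetD arr j 0 ≤ PySem.List.pyGetD dep i 0 ∧
            PySem.List.pyGetD dep j 0 ≥ PySem.List.pyGetD arr i 0 then c + 1 else c)
        = (if (PySem.List.pyGetD pairs j (0, 0)).1 ≤ (PySem.List.pyGetD pairs i (0,0)).2 ∧
              (PySem.List.pyGetD pairs j (0, 0)).2 ≥ (PySem.List.pyGetD pairs i (0,0)).1 then c + 1 else c) := by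
      intro c j hj
      rw [PySem.List.mem_pyRange_one] at hj
      rw [hget j (by omega) hj.2, hget i hi.1 hi.2]
    dsimp only
    rw [PySem.List.foldl_congr_mem _ _ _ _ hbody2]
    rw [← hlen]
    rw [inner_loop pairs (PySem.List.pyGetD pairs i (0,0)) (i+1) 1 (by omega)]
    have : (i + 1).toNat = i.toNat + 1 := by omega
    rw [this]
  rw [PySem.List.foldl_congr_mem _ _ _ _ (fun r i hi => hbody r i hi)]
  rw [← hlen, outer_loop pairs 0 1 (by omega)]
  simp only [Int.toNat_zero, List.drop_zero]
  rw [pvFoldA_eq_max pairs 1 (by omega)]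
  have := one_le_pvBest pairs
  omega

-- ---- B-side lemmas ----

lemma pvInsort_perm (p : Int × Int) (l : List (Int × Int)) : (pvInsort p l).Perm (p :: l) := by
  induction l with
  | nil => simp [pvInsort]
  | cons q qs ih =>
    rw [pvInsort]
    split_ifs
    · exact List.Perm.refl _
    · exact ((ih.cons q).trans (List.Perm.swap p q qs))

lemma pvInsort_pairwise (p : Int × Int) (l : List (Int × Int))
    (h : l.Pairwise (fun x y => x.1 ≤ y.1)) :
    (pvInsort p l).Pairwise (fun x y => x.1 ≤ y.1) := by
  induction l with
  | nil => simp [pvInsort]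
  | cons q qs ih =>
    rw [pvInsort]
    rw [List.pairwise_cons] at h
    split_ifs with hlt
    · refine List.pairwise_cons.mpr ⟨?_, List.pairwise_cons.mpr h⟩
      intro x hx
      have hpq : p.1 ≤ q.1 := by rcases hlt with h1 | h1; omega; omega
      rcases List.mem_cons.mp hx with rfl | hx
      · exact hpq
      · exact le_trans hpq (h.1 x hx)
    · refine List.pairwise_cons.mpr ⟨?_, ih h.2⟩
      intro x hx
      have hx' : x ∈ p :: qs := (pvInsort_perm p qs).mem_iff.mp hx
      rcases List.mem_cons.mp hx' with rfl | hx'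
      · omega
      · exact h.1 x hx'

lemma pvSort_perm (l : List (Int × Int)) : (pvSort l).Perm l := by
  induction l with
  | nil => simp [pvSort]
  | cons p rest ih =>
    exact (pvInsort_perm p (pvSort rest)).trans (ih.cons p)

lemma pvSort_pairwise (l : List (Int × Int)) : (pvSort l).Pairwise (fun x y => x.1 ≤ y.1) := by
  induction l with
  | nil => simp [pvSort]
  | cons p rest ih => exact pvInsort_pairwise p (pvSort rest) ih

-- counting over the binary-searched sorted prefix = counting the joint predicate
lemma count_take (S rest : List (Int × Int)) (a d : Int)
    (hperm : S.Perm rest) (hsort : S.Pairwise (fun x y => x.1 ≤ y.1)) :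
    (((S.take (PySem.List.bisectRight (S.map Prod.fst) d)).filter (fun q => q.2 ≥ a)).length : Int)
      = pvCnt (a, d) rest := by
  have hsortK : (S.map Prod.fst).Pairwise (· ≤ ·) :=
    hsort.map Prod.fst (fun x y h => h)
  obtain ⟨hk, hlo, hhi⟩ := PySem.List.bisectRight_spec (S.map Prod.fst) d hsortK
  set k := PySem.List.bisectRight (S.map Prod.fst) d with hkdef
  have hklen : k ≤ S.length := by simpa using hk
  -- every element of the prefix has arrival ≤ d
  have htake : ∀ q ∈ S.take k, q.1 ≤ d := by
    intro q hq
    obtain ⟨j, hj, rfl⟩ := List.mem_iff_getElem.mp hq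
    have hj1 : j < k := lt_of_lt_of_le hj (by simp)
    have hj2 : j < S.length := lt_of_lt_of_le hj1 hklen
    have := hlo j (by simpa using hj2) hj1
    simpa [List.getElem_take] using this
  -- every element of the remainder has arrival > d
  have hdrop : ∀ q ∈ S.drop k, d < q.1 := by
    intro q hq
    obtain ⟨j, hj, rfl⟩ := List.mem_iff_getElem.mp hq
    have hj2 : k + j < S.length := by
      have := hj; simp at this; omega
    have := hhi (k + j) (by simpa using hj2) (Nat.le_add_right _ _)
    simpa [List.getElem_drop] using this
  have hsplit : S.countP (fun q => decide (q.1 ≤ d) && decide (a ≤ q.2))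
      = (S.take k).countP (fun q => decide (q.1 ≤ d) && decide (a ≤ q.2))
        + (S.drop k).countP (fun q => decide (q.1 ≤ d) && decide (a ≤ q.2)) := by
    conv_lhs => rw [← List.take_append_drop k S]
    rw [List.countP_append]
  have hz : (S.drop k).countP (fun q => decide (q.1 ≤ d) && decide (a ≤ q.2)) = 0 := by
    rw [List.countP_eq_zero]
    intro q hq
    have := hdrop q hq
    simp; intro h; omega
  have hc : (S.take k).countP (fun q => decide (q.1 ≤ d) && decide (a ≤ q.2))
      = (S.take k).countP (fun q => decide (q.2 ≥ a)) := by
    apply List.countP_congr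
    intro q hq
    have := htake q hq
    simp [this]
  simp only [pvCnt]
  rw [← List.countP_eq_length_filter, ← List.countP_eq_length_filter]
  rw [← hperm.countP_eq (fun q => decide (q.1 ≤ d) && decide (a ≤ q.2))]
  rw [hsplit, hz, hc]
  simp

-- B's countdown sweep, by downward induction on the index
lemma alt_loop (arr dep : List Int) (hpre : arr.length ≤ dep.length) :
    ∀ i : Int, i < (arr.length : Int) →
    ((PySem.List.pyRange i (-1) (-1)).foldl
      (fun (st : Int × List (Int × Int)) i =>
        let a := PySem.List.pyGetD arr i 0
        let d := PySem.List.pyGetD dep i 0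
        let k := PySem.List.bisectRight (st.2.map Prod.fst) d
        let c : Int := 1 + (((st.2.take k).filter (fun q => q.2 ≥ a)).length : Int)
        (if c > st.1 then c else st.1, pvInsort (a, d) st.2))
      (pvBest ((arr.zip dep).drop (i + 1).toNat), pvSort ((arr.zip dep).drop (i + 1).toNat)))
    = (pvBest (arr.zip dep), pvSort (arr.zip dep)) := by
  intro i hi
  by_cases h0 : i < 0
  · rw [PySem.List.pyRange_neg_one_eq_nil (by omega)]
    have : (i + 1).toNat = 0 := by omega
    simp [this]
  · replace h0 : 0 ≤ i := by omega
    set pairs := List.zip arr dep with hp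
    have hlen : pairs.length = arr.length := by simp [hp]; omega
    rw [PySem.List.pyRange_neg_one_cons (by omega)]
    simp only [List.foldl_cons]
    -- identify the step at index i
    have hi1 : i.toNat < arr.length := by omega
    have hget : PySem.List.pyGetD pairs i (0, 0) = (PySem.List.pyGetD arr i 0, PySem.List.pyGetD dep i 0) := by
      rw [PySem.List.pyGetD_eq_getElem pairs (0,0) h0 (by exact_mod_cast (by omega : i < (pairs.length : Int))),
          PySem.List.pyGetD_eq_getElem arr 0 h0 (by exact_mod_cast hi),
          PySem.List.pyGetD_eq_getElem dep 0 h0 (by exact_mod_cast (by omega : i < (dep.length : Int)))]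
      simp [hp]
    have hdropi : pairs.drop i.toNat
        = PySem.List.pyGetD pairs i (0, 0) :: pairs.drop (i.toNat + 1) := by
      rw [PySem.List.pyGetD_eq_getElem pairs (0,0) h0 (by exact_mod_cast (by omega : i < (pairs.length : Int)))]
      exact List.drop_eq_getElem_cons (by omega)
    set rest := pairs.drop (i + 1).toNat with hrest
    have hrest' : pairs.drop (i.toNat + 1) = rest := by
      rw [hrest]; congr 1; omega
    have hstep :
        (let a := PySem.List.pyGetD arr i 0
         let d := PySem.List.pyGetD dep i 0
         let k := PySem.List.bisectRight ((pvSort rest).map Prod.fst) d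
         let c : Int := 1 + ((((pvSort rest).take k).filter (fun q => q.2 ≥ a)).length : Int)
         ((if c > pvBest rest then c else pvBest rest : Int), pvInsort (a, d) (pvSort rest)))
        = (pvBest (pairs.drop i.toNat), pvSort (pairs.drop i.toNat)) := by
      have hcnt := count_take (pvSort rest) rest (PySem.List.pyGetD arr i 0) (PySem.List.pyGetD dep i 0)
        (pvSort_perm rest) (pvSort_pairwise rest)
      simp only
      rw [hcnt]
      rw [hdropi, hrest', hget]
      rw [Prod.mk.injEq]
      refine ⟨?_, ?_⟩
      · rw [pvBest]
        rw [max_def]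
        split_ifs <;> omega
      · rfl
    rw [hstep]
    have := alt_loop arr dep hpre (i - 1) (by omega)
    have hieq : (i - 1 + 1).toNat = i.toNat := by omega
    rw [hieq] at this
    exact this
termination_by i => (i + 1).toNat
decreasing_by omega

lemma brute_force_alt_eq (arr dep : List Int) (hpre : arr.length ≤ dep.length) :
    brute_force_alt arr dep = pvBest (List.zip arr dep) := by
  unfold brute_force_alt
  have h := alt_loop arr dep hpre ((arr.length : Int) - 1) (by omega)
  have h1 : ((arr.length : Int) - 1 + 1).toNat = arr.length := by omega
  rw [h1] at h
  have h2 : (List.zip arr dep).drop arr.length = [] := by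
    apply List.drop_eq_nil_of_le
    simp
  rw [h2] at h
  simp only [pvBest, pvSort, List.foldr_nil] at h
  rw [h]

-- ===== VERDICT (by name: the statement is the Claim_ definition above) =====
theorem brute_force_spec : Claim_equal_brute_force := by
  intro arr dep _ hpre
  unfold Spec_brute_force
  rw [brute_force_eq arr dep hpre, brute_force_alt_eq arr dep hpre]
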